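-- pv_equiv track=rewrite | github.com/Raihan-Seraj/Language_Classification | Language Classification/scratchpad.py | does_string_contain_chars
-- ===== SOURCE A (Python) =====
-- def does_string_contain_chars(string, charx):
--     strip = string
--     t = 0
--     for c in charx:
--         t += 1
--         if c not in strip:
--             return False
--         strip = strip.replace(c,'', 1)
--     return True
-- ===== SOURCE B (Python) =====
-- def does_string_contain_chars(string, charx):
--     ss = sorted(string)
--     cx = sorted(charx)
--     i = 0
--     for c in cx:
--         while i < len(ss) and ss[i] < c:
--             i += 1
--         if i >= len(ss) or ss[i] != c:
--             return False
--         i += 1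
--     return True
-- ===== Notes on version B (the rewrite author's own statement) =====
-- stated objective: faster
-- what changed: Replaces A's per-character substring scan and first-occurrence removal with one sorted two-pointer merge over sorted(string) and sorted(charx).
import Mathlib
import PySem

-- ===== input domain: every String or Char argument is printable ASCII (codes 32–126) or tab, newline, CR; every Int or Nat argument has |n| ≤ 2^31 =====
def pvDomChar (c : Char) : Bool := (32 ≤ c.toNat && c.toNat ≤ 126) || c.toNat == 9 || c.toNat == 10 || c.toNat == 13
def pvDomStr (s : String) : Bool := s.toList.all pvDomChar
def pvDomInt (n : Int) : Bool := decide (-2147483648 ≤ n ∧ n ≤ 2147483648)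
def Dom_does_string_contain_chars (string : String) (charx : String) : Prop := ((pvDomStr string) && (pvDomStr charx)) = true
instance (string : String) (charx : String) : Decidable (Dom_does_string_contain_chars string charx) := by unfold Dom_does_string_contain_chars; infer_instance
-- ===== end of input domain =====

-- B replaces A's per-character membership scan + first-occurrence removal by a single
-- two-pointer merge over the two sorted character lists (objective: faster).


-- ===== PORT A =====
-- A's loop over charx; `c in strip` for a single character c is char membership, and
-- strip.replace(c, '', 1) for a single character c removes exactly the first occurrence
-- of c, i.e. List.erase (exact for one-character patterns).
def pvALoop (strip : List Char) (t : Int) : List Char → Bool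
  | [] => true
  | c :: rest =>
    let t' := t + 1
    if c ∈ strip then pvALoop (strip.erase c) t' rest else false

def does_string_contain_chars (string : String) (charx : String) : Bool :=
  pvALoop string.toList 0 charx.toList

-- ===== PORT B =====
-- Source B's merge: the index i into ss becomes structural recursion on ss; the `while ss[i] < c`
-- advance is the first branch, the match/mismatch test the second/third.
def pvBLoop : List Char → List Char → Bool
  | _, [] => true
  | [], _ :: _ => false
  | s :: ss, c :: cx =>
    if s < c then pvBLoop ss (c :: cx)
    else if s = c then pvBLoop ss cx
    else false

def does_string_contain_chars_alt (string : String) (charx : String) : Bool :=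
  pvBLoop (PySem.List.sorted string.toList (fun x => x) false)
          (PySem.List.sorted charx.toList (fun x => x) false)

-- ===== PRECONDITION & SPEC =====
def Spec_does_string_contain_chars (string : String) (charx : String) (out : Bool) : Prop := out = does_string_contain_chars_alt string charx
instance (string : String) (charx : String) (out : Bool) : Decidable (Spec_does_string_contain_chars string charx out) := by unfold Spec_does_string_contain_chars; infer_instance

-- ===== CLAIM (what is proved, stated in full; the proofs are below) =====
def Claim_equal_does_string_contain_chars : Prop := ∀ (string : String) (charx : String), Dom_does_string_contain_chars string charx → Spec_does_string_contain_chars string charx (does_string_contain_chars string charx)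

-- ===== LEMMAS AND PROOFS =====

theorem pvALoop_eq_subperm (cx : List Char) : ∀ (strip : List Char) (t : Int),
    pvALoop strip t cx = decide (List.Subperm cx strip) := by
  induction cx with
  | nil => intro strip t; simp [pvALoop, List.nil_subperm]
  | cons c rest ih =>
    intro strip t
    by_cases h : c ∈ strip
    · rw [pvALoop, if_pos h, ih]
      have hiff : (List.Subperm (c :: rest) strip) ↔ (List.Subperm rest (strip.erase c)) := by
        constructor
        · intro h2
          have := h2.erase c
          simpa using this
        · intro h2
          have h3 : List.Subperm (c :: rest) (c :: strip.erase c) := (List.subperm_cons c).mpr h2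
          exact h3.trans (List.perm_cons_erase h).symm.subperm
      simp [hiff]
    · rw [pvALoop, if_neg h]
      have : ¬ (List.Subperm (c :: rest) strip) := fun h2 => h (h2.subset (List.mem_cons_self))
      simp [this]

theorem pvBLoop_eq_subperm : ∀ (ss cx : List Char),
    ss.Pairwise (· ≤ ·) → cx.Pairwise (· ≤ ·) →
    pvBLoop ss cx = decide (List.Subperm cx ss) := by
  intro ss cx
  induction ss, cx using pvBLoop.induct with
  | case1 ss => intro _ _; simp [pvBLoop, List.nil_subperm]
  | case2 c cx => intro _ _; simp [pvBLoop, List.subperm_nil]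
  | case3 s ss c cx hlt ih =>
    intro hss hcx
    rw [pvBLoop, if_pos hlt, ih hss.tail hcx]
    have hmem : ∀ x ∈ c :: cx, c ≤ x := by
      intro x hx
      rcases List.mem_cons.mp hx with rfl | hx
      · exact le_refl x
      · exact List.rel_of_pairwise_cons hcx hx
    have hiff : List.Subperm (c :: cx) (s :: ss) ↔ List.Subperm (c :: cx) ss := by
      rw [List.subperm_ext_iff, List.subperm_ext_iff]
      apply forall_congr'; intro x
      apply imp_congr_right; intro hx
      have hxs : x ≠ s := fun he => absurd (lt_of_lt_of_le hlt (hmem x hx)) (by simp [he])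
      simp [List.count_cons, if_neg (Ne.symm hxs)]
    simp [hiff]
  | case4 ss c cx hnlt ih =>
    intro hss hcx
    rw [pvBLoop, if_neg hnlt, if_pos rfl, ih hss.tail hcx.tail]
    simp [List.subperm_cons]
  | case5 s ss c cx hnlt hne =>
    intro hss hcx
    rw [pvBLoop, if_neg hnlt, if_neg hne]
    have hcs : c < s := lt_of_le_of_ne (not_lt.mp hnlt) (fun he => hne he.symm)
    have hnot : ¬ List.Subperm (c :: cx) (s :: ss) := by
      intro h2
      have hc : c ∈ s :: ss := h2.subset (List.mem_cons_self)
      rcases List.mem_cons.mp hc with rfl | hc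
      · exact lt_irrefl c hcs
      · exact absurd (List.rel_of_pairwise_cons hss hc) (not_le.mpr hcs)
    simp [hnot]

-- ===== VERDICT (by name: the statement is the Claim_ definition above) =====
theorem does_string_contain_chars_spec : Claim_equal_does_string_contain_chars := by
  intro string charx _
  unfold Spec_does_string_contain_chars does_string_contain_chars does_string_contain_chars_alt
  rw [pvALoop_eq_subperm,
      pvBLoop_eq_subperm _ _
        (by simpa using PySem.List.sorted_pairwise string.toList (fun x => x))
        (by simpa using PySem.List.sorted_pairwise charx.toList (fun x => x))]
  have p1 := PySem.List.sorted_perm string.toList (fun x => x) false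
  have p2 := PySem.List.sorted_perm charx.toList (fun x => x) false
  simp only [decide_eq_decide]
  rw [p2.subperm_right, p1.subperm_left]
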